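-- pv_equiv track=rewrite | github.com/Babajan-B/AlphaGenome-AI-Powered-Genomic-Analysis-Platform | python-backend/main.py | get_nearest_supported_length
-- ===== SOURCE A (Python) =====
-- def get_nearest_supported_length(length: int) -> int:
--     """Get the nearest supported AlphaGenome sequence length"""
--     supported_lengths = [2048, 16384, 131072, 524288, 1048576]
--
--     # Find the closest supported length
--     closest = min(supported_lengths, key=lambda x: abs(x - length))
--
--     # If the requested length is larger, use the largest supported
--     if length > max(supported_lengths):
--         return max(supported_lengths)
--
--     # If the requested length is between two supported lengths, use the larger one
--     for i, sup_len in enumerate(supported_lengths):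
--         if length <= sup_len:
--             return sup_len
--
--     return closest
-- ===== SOURCE B (Python) =====
-- import bisect
--
-- def get_nearest_supported_length(length: int) -> int:
--     """Get the nearest supported AlphaGenome sequence length (ceiling, capped at max)."""
--     supported_lengths = [2048, 16384, 131072, 524288, 1048576]
--     idx = bisect.bisect_left(supported_lengths, length)
--     if idx < len(supported_lengths):
--         return supported_lengths[idx]
--     return supported_lengths[-1]
-- ===== Notes on version B (the rewrite author's own statement) =====
-- stated objective: idiomatic
-- what changed: Replaces A's dead min-by-distance computation plus linear scan with a single bisect_left binary-search ceiling lookup capped at the maximum supported length.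
import Mathlib
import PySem

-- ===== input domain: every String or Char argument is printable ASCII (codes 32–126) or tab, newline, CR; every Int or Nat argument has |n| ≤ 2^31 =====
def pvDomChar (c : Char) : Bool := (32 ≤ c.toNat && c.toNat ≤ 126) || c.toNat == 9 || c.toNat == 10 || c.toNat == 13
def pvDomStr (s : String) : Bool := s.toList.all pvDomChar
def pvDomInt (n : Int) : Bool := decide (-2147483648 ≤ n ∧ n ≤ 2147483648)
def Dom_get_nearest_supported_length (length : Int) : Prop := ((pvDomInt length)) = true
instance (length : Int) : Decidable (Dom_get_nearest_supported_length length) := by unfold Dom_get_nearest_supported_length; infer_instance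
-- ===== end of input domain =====

-- B replaces A's dead min-by-distance computation and linear scan with a bisect_left binary-search ceiling lookup capped at the maximum supported length (idiomatic; same results).


-- ===== PORT A =====
-- helper: the 'for i, sup_len in enumerate(...): if length <= sup_len: return sup_len' loop
def pvLoopA (l : Int) : List Int → Option Int
  | [] => none
  | x :: t => if l ≤ x then some x else pvLoopA l t

def get_nearest_supported_length (length : Int) : Int :=
  let supported_lengths : List Int := [2048, 16384, 131072, 524288, 1048576]
  -- closest = min(supported_lengths, key=lambda x: abs(x - length)); list is a nonempty literal, min? is always some
  let closest : Int := (PySem.List.min? supported_lengths (fun x => |x - length|)).getD 0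
  -- max(supported_lengths); nonempty literal, max? is always some
  let mx : Int := (PySem.List.max? supported_lengths (fun y => y)).getD 0
  if length > mx then mx
  else
    match pvLoopA length supported_lengths with
    | some v => v
    | none => closest

-- ===== PORT B =====
-- bisect.bisect_left on a list, the standard lo/hi binary search
def pvBisectLeft (xs : List Int) (x : Int) (lo hi : Nat) : Nat :=
  if h : lo < hi then
    let mid := (lo + hi) / 2
    if xs.getD mid 0 < x then pvBisectLeft xs x (mid + 1) hi
    else pvBisectLeft xs x lo mid
  else lo
termination_by hi - lo
decreasing_by
  · omega
  · omega

def get_nearest_supported_length_alt (length : Int) : Int :=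
  let supported_lengths : List Int := [2048, 16384, 131072, 524288, 1048576]
  let idx := pvBisectLeft supported_lengths length 0 supported_lengths.length
  if idx < supported_lengths.length then
    (PySem.List.pyGet? supported_lengths (Int.ofNat idx)).getD 0
  else
    (PySem.List.pyGet? supported_lengths (-1)).getD 0

-- ===== PRECONDITION & SPEC =====
def Spec_get_nearest_supported_length (length : Int) (out : Int) : Prop := out = get_nearest_supported_length_alt length
instance (length : Int) (out : Int) : Decidable (Spec_get_nearest_supported_length length out) := by unfold Spec_get_nearest_supported_length; infer_instance

-- ===== CLAIM (what is proved, stated in full; the proofs are below) =====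
def Claim_equal_get_nearest_supported_length : Prop := ∀ (length : Int), Dom_get_nearest_supported_length length → Spec_get_nearest_supported_length length (get_nearest_supported_length length)

-- ===== LEMMAS AND PROOFS =====

-- ===== VERDICT (by name: the statement is the Claim_ definition above) =====
-- evaluation lemmas for the binary search (proofs only; the ports above are unchanged)
theorem bl_step {L : List Int} {l : Int} {lo hi : Nat} (h : lo < hi) :
    pvBisectLeft L l lo hi =
      if L.getD ((lo + hi) / 2) 0 < l then pvBisectLeft L l ((lo + hi) / 2 + 1) hi
      else pvBisectLeft L l lo ((lo + hi) / 2) := by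
  rw [pvBisectLeft]; simp [h]

theorem bl_done {L : List Int} {l : Int} {lo hi : Nat} (h : ¬ lo < hi) :
    pvBisectLeft L l lo hi = lo := by
  rw [pvBisectLeft]; simp [h]

theorem idx_eval (l : Int) :
    pvBisectLeft [2048, 16384, 131072, 524288, 1048576] l 0 5 =
      if l ≤ 2048 then 0 else if l ≤ 16384 then 1 else if l ≤ 131072 then 2
      else if l ≤ 524288 then 3 else if l ≤ 1048576 then 4 else 5 := by
  by_cases h1 : l ≤ 2048
  · rw [bl_step (by norm_num)]; norm_num [List.getD]
    rw [if_neg (by omega : ¬ (131072:Int) < l)]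
    rw [bl_step (by norm_num)]; norm_num [List.getD]
    rw [if_neg (by omega : ¬ (16384:Int) < l)]
    rw [bl_step (by norm_num)]; norm_num [List.getD]
    rw [if_neg (by omega : ¬ (2048:Int) < l), bl_done (by norm_num), if_pos h1]
  · by_cases h2 : l ≤ 16384
    · rw [bl_step (by norm_num)]; norm_num [List.getD]
      rw [if_neg (by omega : ¬ (131072:Int) < l)]
      rw [bl_step (by norm_num)]; norm_num [List.getD]
      rw [if_neg (by omega : ¬ (16384:Int) < l)]
      rw [bl_step (by norm_num)]; norm_num [List.getD]
      rw [if_pos (by omega : (2048:Int) < l), bl_done (by norm_num),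
          if_neg h1, if_pos h2]
    · by_cases h3 : l ≤ 131072
      · rw [bl_step (by norm_num)]; norm_num [List.getD]
        rw [if_neg (by omega : ¬ (131072:Int) < l)]
        rw [bl_step (by norm_num)]; norm_num [List.getD]
        rw [if_pos (by omega : (16384:Int) < l), bl_done (by norm_num),
            if_neg h1, if_neg h2, if_pos h3]
      · by_cases h4 : l ≤ 524288
        · rw [bl_step (by norm_num)]; norm_num [List.getD]
          rw [if_pos (by omega : (131072:Int) < l)]
          rw [bl_step (by norm_num)]; norm_num [List.getD]
          rw [if_neg (by omega : ¬ (1048576:Int) < l)]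
          rw [bl_step (by norm_num)]; norm_num [List.getD]
          rw [if_neg (by omega : ¬ (524288:Int) < l), bl_done (by norm_num),
              if_neg h1, if_neg h2, if_neg h3, if_pos h4]
        · by_cases h5 : l ≤ 1048576
          · rw [bl_step (by norm_num)]; norm_num [List.getD]
            rw [if_pos (by omega : (131072:Int) < l)]
            rw [bl_step (by norm_num)]; norm_num [List.getD]
            rw [if_neg (by omega : ¬ (1048576:Int) < l)]
            rw [bl_step (by norm_num)]; norm_num [List.getD]
            rw [if_pos (by omega : (524288:Int) < l), bl_done (by norm_num),
                if_neg h1, if_neg h2, if_neg h3, if_neg h4, if_pos h5]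
          · rw [bl_step (by norm_num)]; norm_num [List.getD]
            rw [if_pos (by omega : (131072:Int) < l)]
            rw [bl_step (by norm_num)]; norm_num [List.getD]
            rw [if_pos (by omega : (1048576:Int) < l), bl_done (by norm_num),
                if_neg h1, if_neg h2, if_neg h3, if_neg h4, if_neg h5]

theorem get_nearest_supported_length_spec : Claim_equal_get_nearest_supported_length := by
  intro length _
  unfold Spec_get_nearest_supported_length get_nearest_supported_length get_nearest_supported_length_alt
  have hmx : (PySem.List.max? [(2048:Int), 16384, 131072, 524288, 1048576] (fun y => y)).getD 0
      = (1048576 : Int) := by decide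
  simp only [hmx, List.length_cons, List.length_nil, Nat.reduceAdd, idx_eval]
  by_cases h1 : length ≤ 2048
  · rw [if_neg (by omega)]
    simp only [pvLoopA, if_pos h1]
    decide
  · by_cases h2 : length ≤ 16384
    · rw [if_neg (by omega)]
      simp only [pvLoopA, if_neg h1, if_pos h2]
      decide
    · by_cases h3 : length ≤ 131072
      · rw [if_neg (by omega)]
        simp only [pvLoopA, if_neg h1, if_neg h2, if_pos h3]
        decide
      · by_cases h4 : length ≤ 524288
        · rw [if_neg (by omega)]
          simp only [pvLoopA, if_neg h1, if_neg h2, if_neg h3, if_pos h4]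
          decide
        · by_cases h5 : length ≤ 1048576
          · rw [if_neg (by omega)]
            simp only [pvLoopA, if_neg h1, if_neg h2, if_neg h3, if_neg h4, if_pos h5]
            decide
          · rw [if_pos (by omega)]
            simp only [if_neg h1, if_neg h2, if_neg h3, if_neg h4, if_neg h5]
            decide
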